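-- pv_equiv track=rewrite | github.com/Laurenzpy/Final-Project-ADA | experiments/train_seq2seq.py | choose_canonical_output
-- ===== SOURCE A (Python) =====
-- def choose_canonical_output(outputs: list[str]) -> str:
--     """Most frequent output; tie-breaker: shorter."""
--     outputs = [" ".join(str(o).split()) for o in outputs if str(o).strip()]
--     if not outputs:
--         return ""
--     counts: dict[str, int] = {}
--     for o in outputs:
--         counts[o] = counts.get(o, 0) + 1
--     mx = max(counts.values())
--     cand = [o for o, c in counts.items() if c == mx]
--     cand.sort(key=lambda s: (len(s.split()), len(s)))
--     return cand[0]
-- ===== SOURCE B (Python) =====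
-- def choose_canonical_output(outputs: list[str]) -> str:
--     """Most frequent output; tie-breaker: shorter."""
--     norm = [" ".join(str(o).split()) for o in outputs if str(o).strip()]
--     counts: dict[str, int] = {}
--     for o in norm:
--         counts[o] = counts.get(o, 0) + 1
--     best = None
--     for o, c in counts.items():
--         k = (-c, len(o.split()), len(o))
--         if best is None or k < best[1]:
--             best = (o, k)
--     return best[0] if best is not None else ""
-- ===== Notes on version B (the rewrite author's own statement) =====
-- stated objective: alternative
-- what changed: Keeps the normalization and frequency dict but replaces A's max-over-values + candidate filter + stable sort + head with a single explicit argmin loop over the dict items using the lexicographic composite key (-count, word-count, length).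
import Mathlib
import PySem

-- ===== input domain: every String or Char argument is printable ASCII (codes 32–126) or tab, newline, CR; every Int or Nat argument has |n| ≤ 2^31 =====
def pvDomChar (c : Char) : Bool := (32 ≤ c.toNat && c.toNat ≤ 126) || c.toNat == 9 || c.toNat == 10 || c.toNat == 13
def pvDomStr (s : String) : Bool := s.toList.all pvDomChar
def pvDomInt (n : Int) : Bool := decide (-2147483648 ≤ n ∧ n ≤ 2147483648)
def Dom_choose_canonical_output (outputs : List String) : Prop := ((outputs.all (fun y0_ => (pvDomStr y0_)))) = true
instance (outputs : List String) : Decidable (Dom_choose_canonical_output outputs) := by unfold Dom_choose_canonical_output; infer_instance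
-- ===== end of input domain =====

-- B keeps the normalization and frequency dict but replaces A's max-over-values + candidate filter +
-- stable sort + head by one explicit argmin loop over the dict items with the lexicographic
-- composite key (-count, word-count, length); alternative decomposition, no speed claim.

-- ===== PORT A =====
-- shared key helpers (Python's `len(s.split())` and `len(s)`, used as sort/tie-break keys by both versions)
def pvK1 (s : String) : Int := ((PySem.Str.split₀ s).length : Int)
def pvK2 (s : String) : Int := PySem.Str.len s

def choose_canonical_output (outputs : List String) : String :=
  -- outputs = [" ".join(str(o).split()) for o in outputs if str(o).strip()]
  let outputs := (outputs.filter (fun o => !(PySem.Str.strip o == ""))).map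
      (fun o => PySem.Str.join " " (PySem.Str.split₀ o))
  if outputs.isEmpty then ""
  else
    -- counts[o] = counts.get(o, 0) + 1
    let counts : PySem.Dict String Int :=
      outputs.foldl (fun d o => d.insert o (d.getD o 0 + 1)) PySem.Dict.empty
    -- counts is nonempty here, so max below is `some` and cand is nonempty: the defaults are unreachable
    let mx : Int := (PySem.List.max? counts.values (fun v => v)).getD 0
    let cand := (counts.items.filter (fun p => p.2 == mx)).map (fun p => p.1)
    let cand := PySem.List.sorted2 cand pvK1 pvK2
    (PySem.List.pyGet? cand 0).getD ""

-- ===== PORT B =====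
-- Python tuple `<` on the 3-tuple key, written out lexicographically
def pvLt3 (a b : Int × Int × Int) : Bool :=
  decide (a.1 < b.1) ||
    (decide (a.1 = b.1) &&
      (decide (a.2.1 < b.2.1) || (decide (a.2.1 = b.2.1) && decide (a.2.2 < b.2.2))))

def choose_canonical_output_alt (outputs : List String) : String :=
  let norm := (outputs.filter (fun o => !(PySem.Str.strip o == ""))).map
      (fun o => PySem.Str.join " " (PySem.Str.split₀ o))
  let counts : PySem.Dict String Int :=
    norm.foldl (fun d o => d.insert o (d.getD o 0 + 1)) PySem.Dict.empty
  let best := counts.items.foldl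
    (fun best oc =>
      let k : Int × Int × Int := (-oc.2, pvK1 oc.1, pvK2 oc.1)
      match best with
      | none => some (oc.1, k)
      | some (b, bk) => if pvLt3 k bk then some (oc.1, k) else some (b, bk))
    none
  match best with
  | some (b, _) => b
  | none => ""

-- ===== PRECONDITION & SPEC =====
def Spec_choose_canonical_output (outputs : List String) (out : String) : Prop := out = choose_canonical_output_alt outputs
instance (outputs : List String) (out : String) : Decidable (Spec_choose_canonical_output outputs out) := by unfold Spec_choose_canonical_output; infer_instance

-- ===== CLAIM (what is proved, stated in full; the proofs are below) =====
def Claim_equal_choose_canonical_output : Prop := ∀ (outputs : List String), Dom_choose_canonical_output outputs → Spec_choose_canonical_output outputs (choose_canonical_output outputs)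

-- ===== LEMMAS AND PROOFS =====

-- proof-side abbreviations
def pvC (norm : List String) (s : String) : Int := (List.count s norm : Int)
def pvK3 (norm : List String) (s : String) : Int × Int × Int :=
  (-(List.count s norm : Int), pvK1 s, pvK2 s)
def pvLt2 (a b : String) : Bool :=
  decide (pvK1 a < pvK1 b) || !decide (pvK1 b < pvK1 a) && decide (pvK2 a < pvK2 b)

theorem pvK3_eq (norm : List String) (s : String) :
    pvK3 norm s = (-(pvC norm s), pvK1 s, pvK2 s) := rfl

-- (i)-(iii): the 3-tuple lex key vs the 2-tuple sort key, by count comparison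
theorem pvLt3_eq_lt2 {norm : List String} {x m : String} (h : pvC norm x = pvC norm m) :
    pvLt3 (pvK3 norm x) (pvK3 norm m) = pvLt2 x m := by
  rw [Bool.eq_iff_iff]
  simp [pvK3_eq, pvLt3, pvLt2, h]
  omega

theorem pvLt3_false {norm : List String} {x m : String} (h : pvC norm x < pvC norm m) :
    pvLt3 (pvK3 norm x) (pvK3 norm m) = false := by
  simp [pvK3_eq, pvLt3]
  omega

theorem pvLt3_true {norm : List String} {x m : String} (h : pvC norm m < pvC norm x) :
    pvLt3 (pvK3 norm x) (pvK3 norm m) = true := by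
  simp [pvK3_eq, pvLt3]
  omega

-- head of an insertion-sort fold is the first-occurrence argmin
theorem pvHeadInsertFold {α : Type} (before : α → α → Bool) :
    ∀ (xs : List α) (b : α) (t : List α), ∃ t',
      xs.foldl (fun acc x => PySem.List.insertBy before x acc) (b :: t)
        = (xs.foldl (fun m x => if before x m then x else m) b) :: t' := by
  intro xs
  induction xs with
  | nil => exact fun b t => ⟨t, rfl⟩
  | cons x xs ih =>
    intro b t
    by_cases h : before x b <;>
      simp only [List.foldl_cons, PySem.List.insertBy, h, if_pos, if_neg,
        Bool.not_eq_true, ite_true, ite_false]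
    · exact ih x (b :: t)
    · exact ih b (PySem.List.insertBy before x t)

-- B's Option-carrying loop is the plain argmin fold
theorem pvOptFold (K : String → Int × Int × Int) :
    ∀ (tl : List String) (b : String),
      tl.foldl
        (fun best o =>
          match best with
          | none => some (o, K o)
          | some (b, bk) => if pvLt3 (K o) bk then some (o, K o) else some (b, bk))
        (some (b, K b))
      = some (tl.foldl (fun m x => if pvLt3 (K x) (K m) then x else m) b,
              K (tl.foldl (fun m x => if pvLt3 (K x) (K m) then x else m) b)) := by
  intro tl
  induction tl with
  | nil => intro b; rfl
  | cons x t ih =>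
    intro b
    by_cases h : pvLt3 (K x) (K b) <;>
      simp only [List.foldl_cons, h, Bool.false_eq_true, ite_true, ite_false] <;>
      exact ih _

-- L2a : if the accumulator already has maximal count, the 3-key argmin over tl
-- is the 2-key argmin over the max-count candidates of tl
theorem pvL2a (norm : List String) (M : Int) :
    ∀ (tl : List String) (m : String), pvC norm m = M → (∀ x ∈ tl, pvC norm x ≤ M) →
      tl.foldl (fun m x => if pvLt3 (pvK3 norm x) (pvK3 norm m) then x else m) m
        = (tl.filter (fun x => pvC norm x == M)).foldl (fun m x => if pvLt2 x m then x else m) m := by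
  intro tl
  induction tl with
  | nil => intros; rfl
  | cons x t ih =>
    intro m hm hall
    have hx := hall x (by simp)
    by_cases hxe : pvC norm x = M
    · have h1 : pvLt3 (pvK3 norm x) (pvK3 norm m) = pvLt2 x m := pvLt3_eq_lt2 (by omega)
      simp only [List.foldl_cons, List.filter_cons, hxe, beq_self_eq_true, ite_true, h1]
      by_cases h2 : pvLt2 x m <;> simp only [h2, Bool.false_eq_true, ite_true, ite_false] <;>
        exact ih _ (by omega) (fun y hy => hall y (by simp [hy]))
    · have h1 : pvLt3 (pvK3 norm x) (pvK3 norm m) = false := pvLt3_false (by omega)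
      have h2 : (pvC norm x == M) = false := by simp [hxe]
      simp only [List.foldl_cons, List.filter_cons, h1, h2, Bool.false_eq_true, ite_false]
      exact ih m hm (fun y hy => hall y (by simp [hy]))

-- L2b : an accumulator with submaximal count is displaced by the first max-count
-- candidate, after which the fold continues as in L2a
theorem pvL2b (norm : List String) (M : Int) :
    ∀ (tl : List String) (m : String), pvC norm m < M → (∀ x ∈ tl, pvC norm x ≤ M) →
    ∀ f fs, tl.filter (fun x => pvC norm x == M) = f :: fs →
      tl.foldl (fun m x => if pvLt3 (pvK3 norm x) (pvK3 norm m) then x else m) m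
        = fs.foldl (fun m x => if pvLt2 x m then x else m) f := by
  intro tl
  induction tl with
  | nil => intro m _ _ f fs hf; simp at hf
  | cons x t ih =>
    intro m hm hall f fs hf
    have hx := hall x (by simp)
    by_cases hxe : pvC norm x = M
    · have h1 : pvLt3 (pvK3 norm x) (pvK3 norm m) = true := pvLt3_true (by omega)
      simp only [List.filter_cons, hxe, beq_self_eq_true, ite_true] at hf
      injection hf with ha hb
      rw [← ha, ← hb]
      simp only [List.foldl_cons, h1, ite_true]
      exact pvL2a norm M t x hxe (fun y hy => hall y (by simp [hy]))
    · have h2 : (pvC norm x == M) = false := by simp [hxe]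
      simp only [List.filter_cons, h2, Bool.false_eq_true, ite_false] at hf
      simp only [List.foldl_cons]
      by_cases h3 : pvLt3 (pvK3 norm x) (pvK3 norm m) <;>
        simp only [h3, Bool.false_eq_true, ite_true, ite_false]
      · exact ih x (by omega) (fun y hy => hall y (by simp [hy])) f fs hf
      · exact ih m hm (fun y hy => hall y (by simp [hy])) f fs hf

-- head of sorted2 on a nonempty list is the first-occurrence 2-key argmin
theorem pvHeadSorted2 (d : String) (rest : List String) :
    ∃ t', PySem.List.sorted2 (d :: rest) pvK1 pvK2
      = (rest.foldl (fun m x => if pvLt2 x m then x else m) d) :: t' := by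
  have h0 : PySem.List.sorted2 (d :: rest) pvK1 pvK2
      = List.foldl (fun acc x => PySem.List.insertBy pvLt2 x acc) [d] rest := rfl
  rw [h0]
  exact pvHeadInsertFold pvLt2 rest d []

-- first element of a Python 0-index lookup on a cons
theorem pvHead0 {α : Type} (a : α) (t : List α) (dflt : α) :
    (PySem.List.pyGet? (a :: t) 0).getD dflt = a := by
  simp [PySem.List.pyGet?, PySem.List.pyIdx?]

-- evaluating B's loop over the counter's items on a nonempty distinct-keys list
theorem pvBval (norm : List String) (d : String) (tl : List String)
    (hS : (PySem.Set.ofList norm : List String) = d :: tl) :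
    (match (PySem.Dict.counter norm).items.foldl
        (fun best oc =>
          let k : Int × Int × Int := (-oc.2, pvK1 oc.1, pvK2 oc.1)
          match best with
          | none => some (oc.1, k)
          | some (b, bk) => if pvLt3 k bk then some (oc.1, k) else some (b, bk))
        none with
     | some (b, _) => b
     | none => "")
    = tl.foldl (fun m x => if pvLt3 (pvK3 norm x) (pvK3 norm m) then x else m) d := by
  rw [PySem.Dict.items_counter, hS, List.map_cons, List.foldl_cons, List.foldl_map]
  -- the mapped step function and its seeded accumulator are definitionally the clean
  -- argmin loop of pvOptFold, so congrArg closes the goal up to defeq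
  exact congrArg
    (fun z : Option (String × (Int × Int × Int)) =>
      match z with
      | some (b, _) => b
      | none => "")
    (pvOptFold (pvK3 norm) tl d)

-- the whole equivalence, for an arbitrary (already normalized) list
theorem pvMainLemma (norm : List String) :
    (if norm.isEmpty then ""
     else
       (PySem.List.pyGet?
         (PySem.List.sorted2
           (((norm.foldl (fun d o => d.insert o (d.getD o 0 + 1))
                (PySem.Dict.empty : PySem.Dict String Int)).items.filter
              (fun p => p.2 ==
                (PySem.List.max?
                  (norm.foldl (fun d o => d.insert o (d.getD o 0 + 1))
                    (PySem.Dict.empty : PySem.Dict String Int)).values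
                  (fun v => v)).getD 0)).map (fun p => p.1))
           pvK1 pvK2) 0).getD "")
    = (match (norm.foldl (fun d o => d.insert o (d.getD o 0 + 1))
          (PySem.Dict.empty : PySem.Dict String Int)).items.foldl
        (fun best oc =>
          let k : Int × Int × Int := (-oc.2, pvK1 oc.1, pvK2 oc.1)
          match best with
          | none => some (oc.1, k)
          | some (b, bk) => if pvLt3 k bk then some (oc.1, k) else some (b, bk))
        none with
       | some (b, _) => b
       | none => "") := by
  by_cases hnil : norm = []
  · subst hnil; rfl
  · rw [if_neg (by simpa [List.isEmpty_iff] using hnil)]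
    rw [PySem.Dict.foldl_insert_getD_add_one_eq_counter]
    have hv : (PySem.Dict.counter norm).values
        = List.map (fun k => (List.count k norm : Int)) (PySem.Set.ofList norm) := by
      simp [PySem.Dict.values, PySem.Dict.items_counter, List.map_map, Function.comp]
    obtain ⟨d, tl, hS⟩ : ∃ d tl, (PySem.Set.ofList norm : List String) = d :: tl := by
      obtain ⟨h, t, rfl⟩ := List.exists_cons_of_ne_nil hnil
      rcases hE : (PySem.Set.ofList (h :: t) : List String) with _ | ⟨a, b⟩
      · have hm : h ∈ (PySem.Set.ofList (h :: t) : List String) :=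
          (PySem.Set.mem_ofList (h :: t) h).mpr (by simp)
        rw [hE] at hm; simp at hm
      · exact ⟨a, b, rfl⟩
    obtain ⟨M, hM⟩ : ∃ M, PySem.List.max? ((PySem.Dict.counter norm).values) (fun v => v) = some M := by
      cases hE : PySem.List.max? ((PySem.Dict.counter norm).values) (fun v => v) with
      | none =>
        rw [PySem.List.max?_eq_none_iff, hv, List.map_eq_nil_iff, hS] at hE
        exact absurd hE (by simp)
      | some M => exact ⟨M, rfl⟩
    rw [hM, Option.getD_some]
    have hub : ∀ x ∈ (PySem.Set.ofList norm : List String), pvC norm x ≤ M := by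
      intro x hxm
      have := PySem.List.max?_isMax hM ((List.count x norm : Int))
        (by rw [hv]; exact List.mem_map.mpr ⟨x, hxm, rfl⟩)
      simpa [pvC] using this
    have hMmem : ∃ x ∈ (PySem.Set.ofList norm : List String), pvC norm x = M := by
      have := PySem.List.max?_mem hM
      rw [hv] at this
      obtain ⟨x, hxm, hxe⟩ := List.mem_map.mp this
      exact ⟨x, hxm, by simpa [pvC] using hxe⟩
    have hcand : ((PySem.Dict.counter norm).items.filter (fun p => p.2 == M)).map (fun p => p.1)
        = (PySem.Set.ofList norm : List String).filter (fun x => pvC norm x == M) := by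
      rw [PySem.Dict.items_counter, List.filter_map, List.map_map]
      simp [Function.comp_def, pvC]
    rw [hcand, pvBval norm d tl hS, hS]
    rw [hS] at hub
    have hubtl : ∀ x ∈ tl, pvC norm x ≤ M := fun x hx => hub x (by simp [hx])
    by_cases hd : pvC norm d = M
    · have hfc : (d :: tl).filter (fun x => pvC norm x == M)
          = d :: tl.filter (fun x => pvC norm x == M) := by
        simp [hd]
      rw [hfc]
      obtain ⟨t', ht'⟩ := pvHeadSorted2 d (tl.filter (fun x => pvC norm x == M))
      rw [ht', pvHead0]
      exact (pvL2a norm M tl d hd hubtl).symm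
    · have hd' : pvC norm d < M := lt_of_le_of_ne (hub d (by simp)) hd
      have hfc : (d :: tl).filter (fun x => pvC norm x == M)
          = tl.filter (fun x => pvC norm x == M) := by
        simp [hd]
      rw [hfc]
      obtain ⟨f, fs, hf⟩ : ∃ f fs, tl.filter (fun x => pvC norm x == M) = f :: fs := by
        obtain ⟨x, hxm, hxe⟩ := hMmem
        rw [hS] at hxm
        have hxtl : x ∈ tl := by
          rcases List.mem_cons.mp hxm with rfl | h
          · exact absurd hxe hd
          · exact h
        cases hE : tl.filter (fun x => pvC norm x == M) with
        | nil =>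
          have hmem : x ∈ tl.filter (fun x => pvC norm x == M) :=
            List.mem_filter.mpr ⟨hxtl, by simp [hxe]⟩
          rw [hE] at hmem; simp at hmem
        | cons f fs => exact ⟨f, fs, rfl⟩
      rw [hf]
      obtain ⟨t', ht'⟩ := pvHeadSorted2 f fs
      rw [ht', pvHead0]
      exact (pvL2b norm M tl d hd' hubtl f fs hf).symm

-- ===== VERDICT (by name: the statement is the Claim_ definition above) =====
theorem choose_canonical_output_spec : Claim_equal_choose_canonical_output := by
  intro outputs _
  show choose_canonical_output outputs = choose_canonical_output_alt outputs
  exact pvMainLemma _
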